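-- pv_equiv track=rewrite | github.com/rhyn0/LeetCode-Problems | challenges/october_2023/daily/validate_btree_node.py | validateBinaryTreeNodesBFS
-- ===== SOURCE A (Python) =====
-- from collections import deque
--
-- def validateBinaryTreeNodesBFS(
--
--     n: int,
--     left_child: list[int],
--     right_child: list[int],
-- ) -> bool:
--     """Return same as above using BFS."""
--
--     def find_root() -> int:
--         # return root node based on nodes that are never children
--         children = set(left_child) | set(right_child)
--         if len(set(range(n)).difference(children)) > 1:
--             # if more than one node is missing, then its multiple disjoint sets
--             return -1
--         for node in range(n):
--             if node not in children:
--                 return node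
--         return -1
--
--     root_num = find_root()
--     if root_num == -1:
--         return False
--
--     seen = {root_num}
--     # use queue to do BFS, go level by level from root
--     stack = deque([root_num])
--     while stack:
--         node = stack.popleft()
--         for child in (left_child[node], right_child[node]):
--             if child == -1:
--                 continue
--             if child in seen:
--                 return False
--             seen.add(child)
--             stack.append(child)
--     # make sure we visit all nodes
--     return len(seen) == n
-- ===== SOURCE B (Python) =====
-- from collections import Counter
--
--
-- def validateBinaryTreeNodesBFS(
--     n: int,
--     left_child: list[int],
--     right_child: list[int],
-- ) -> bool:
--     """Indegree validation plus fixpoint (saturation) reachability, no queue walk."""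
--     indeg = Counter(c for c in left_child + right_child if c != -1)
--     roots = [v for v in range(n) if indeg[v] == 0]
--     if len(roots) != 1:
--         return False
--     if any(indeg[v] > 1 for v in range(n)):
--         return False
--     visited = {roots[0]}
--     for _ in range(n):
--         new = set()
--         for v in visited:
--             for c in (left_child[v], right_child[v]):
--                 if c != -1 and c not in visited:
--                     new.add(c)
--         if not new:
--             break
--         visited |= new
--     return len(visited) == n
-- ===== Notes on version B (the rewrite author's own statement) =====
-- stated objective: alternative
-- what changed: Replaces A's root-by-set-difference search plus deque BFS with duplicate-child early exit by a Counter-based indegree validation (exactly one indegree-0 node, no node with two parents) followed by fixpoint saturation of the set reachable from the root.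
-- outside the precondition, e.g. on validateBinaryTreeNodesBFS(2, [-2, -2], [-2, 1]): A returns False, B returns True; on validateBinaryTreeNodesBFS(1, [1], [1]): A returns False, B returns False
import Mathlib
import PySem

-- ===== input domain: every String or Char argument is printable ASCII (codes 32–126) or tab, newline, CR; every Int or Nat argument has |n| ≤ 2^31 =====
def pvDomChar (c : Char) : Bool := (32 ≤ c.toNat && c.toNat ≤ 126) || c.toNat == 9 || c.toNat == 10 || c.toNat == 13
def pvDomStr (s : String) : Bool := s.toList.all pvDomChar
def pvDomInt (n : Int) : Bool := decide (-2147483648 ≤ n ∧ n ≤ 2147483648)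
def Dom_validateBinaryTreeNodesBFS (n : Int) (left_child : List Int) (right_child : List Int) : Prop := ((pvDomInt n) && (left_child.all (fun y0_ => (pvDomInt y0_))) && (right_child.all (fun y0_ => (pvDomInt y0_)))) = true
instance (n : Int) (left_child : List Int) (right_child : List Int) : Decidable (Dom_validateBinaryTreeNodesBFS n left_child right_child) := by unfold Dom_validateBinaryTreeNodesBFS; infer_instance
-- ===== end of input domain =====

-- B replaces A's set-difference root search + deque BFS (with duplicate-child early exit) by a
-- Counter-based indegree validation followed by fixpoint saturation of the reachable set
-- (objective: alternative; equal return value proved on Pre_).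

-- ===== PORT A =====

-- find_root(): children = set(left)|set(right); >1 missing → -1; else first missing node, else -1
def pvFindRoot (n : Int) (L R : List Int) : Int :=
  let children : PySem.Set Int := PySem.Set.union (PySem.Set.ofList L) (PySem.Set.ofList R)
  if 1 < PySem.Set.len (PySem.Set.diff (PySem.Set.ofList (PySem.List.pyRange 0 n 1)) children) then
    -1
  else
    match (PySem.List.pyRange 0 n 1).find? (fun v => !(PySem.Set.contains children v)) with
    | some v => v
    | none => -1

-- the inner 'for child in (left_child[node], right_child[node])' loop; none = the 'return False'
def pvVisit (seen : PySem.Set Int) (stack : List Int) : List Int → Option (PySem.Set Int × List Int)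
  | [] => some (seen, stack)
  | c :: cs =>
    if c = -1 then pvVisit seen stack cs
    else if PySem.Set.contains seen c then none
    else pvVisit (PySem.Set.add seen c) (stack ++ [c]) cs

-- the 'while stack:' BFS loop; left_child[node] via pyGetD (in range under Pre_; the -2 default and
-- the fuel-0 branch are never reached on inputs satisfying Pre_, which the equivalence proof shows)
def pvBfsLoop (n : Int) (L R : List Int) : Nat → List Int → PySem.Set Int → Bool
  | 0, _, _ => false
  | fuel + 1, stack, seen =>
    match stack with
    | [] => decide (PySem.Set.len seen = n)
    | node :: rest =>
      match pvVisit seen rest [PySem.List.pyGetD L node (-2), PySem.List.pyGetD R node (-2)] with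
      | none => false
      | some (seen', stack') => pvBfsLoop n L R fuel stack' seen'

def validateBinaryTreeNodesBFS (n : Int) (left_child : List Int) (right_child : List Int) : Bool :=
  let root := pvFindRoot n left_child right_child
  if root = -1 then false
  else pvBfsLoop n left_child right_child (n.toNat + 1) [root] (PySem.Set.ofList [root])

-- ===== PORT B =====

-- new = {c for v in visited for c in (left[v], right[v]) if c != -1 and c not in visited}
def pvNewFrom (L R : List Int) (visited : PySem.Set Int) : PySem.Set Int :=
  visited.foldl
    (fun new v =>
      [PySem.List.pyGetD L v (-2), PySem.List.pyGetD R v (-2)].foldl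
        (fun new c => if c ≠ -1 ∧ c ∉ visited then PySem.Set.add new c else new) new)
    PySem.Set.empty

-- 'for _ in range(n): … if not new: break; visited |= new'
def pvSatLoop (L R : List Int) : List Int → PySem.Set Int → PySem.Set Int
  | [], visited => visited
  | _ :: ks, visited =>
    let new := pvNewFrom L R visited
    if new.isEmpty then visited
    else pvSatLoop L R ks (PySem.Set.union visited new)

def validateBinaryTreeNodesBFS_alt (n : Int) (left_child : List Int) (right_child : List Int) : Bool :=
  let indeg := PySem.Dict.counter ((left_child ++ right_child).filter (fun c => c != -1))
  let roots := (PySem.List.pyRange 0 n 1).filter (fun v => indeg.getD v 0 == 0)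
  if roots.length ≠ 1 then false
  else if (PySem.List.pyRange 0 n 1).any (fun v => 1 < indeg.getD v 0) then false
  else
    match roots with
    | [] => false
    | r :: _ =>
      let visited := pvSatLoop left_child right_child (PySem.List.pyRange 0 n 1)
        (PySem.Set.ofList [r])
      decide ((visited.length : Int) = n)

-- ===== PRECONDITION & SPEC =====

-- Pre_ excludes inputs where exactly one node of range(n) is parentless but the child arrays are
-- malformed (length ≠ n, or some child id outside {-1} ∪ [0, n)): on those A's BFS indexes the
-- arrays out of range (IndexError) or walks through accidental negative-index wraparound.
def Pre_validateBinaryTreeNodesBFS (n : Int) (left_child : List Int) (right_child : List Int) : Prop :=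
  (n.toNat - (PySem.Set.ofList ((left_child ++ right_child).filter
      (fun c => decide (0 ≤ c ∧ c < n)))).length ≠ 1) ∨
  ((left_child.length : Int) = n ∧ (right_child.length : Int) = n ∧
    ∀ c ∈ left_child ++ right_child, c = -1 ∨ (0 ≤ c ∧ c < n))

instance (n : Int) (left_child : List Int) (right_child : List Int) :
    Decidable (Pre_validateBinaryTreeNodesBFS n left_child right_child) := by
  unfold Pre_validateBinaryTreeNodesBFS; infer_instance

def pvWitness_validateBinaryTreeNodesBFS : Int × List Int × List Int := (3, [1, 2, -1], [-1, -1, -1])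

def Spec_validateBinaryTreeNodesBFS (n : Int) (left_child : List Int) (right_child : List Int)
    (out : Bool) : Prop := out = validateBinaryTreeNodesBFS_alt n left_child right_child

instance (n : Int) (left_child : List Int) (right_child : List Int) (out : Bool) :
    Decidable (Spec_validateBinaryTreeNodesBFS n left_child right_child out) := by
  unfold Spec_validateBinaryTreeNodesBFS; infer_instance

-- ===== CLAIM (what is proved, stated in full; the proofs are below) =====
def Claim_equal_validateBinaryTreeNodesBFS : Prop := ∀ (n : Int) (left_child : List Int) (right_child : List Int), Dom_validateBinaryTreeNodesBFS n left_child right_child → Pre_validateBinaryTreeNodesBFS n left_child right_child → Spec_validateBinaryTreeNodesBFS n left_child right_child (validateBinaryTreeNodesBFS n left_child right_child)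

-- ===== LEMMAS AND PROOFS =====

-- children of a node, as the port reads them
def pvKid (L R : List Int) (v : Int) : List Int :=
  [PySem.List.pyGetD L v (-2), PySem.List.pyGetD R v (-2)]

-- one edge of the structure
def pvStepRel (L R : List Int) (u c : Int) : Prop := c ≠ -1 ∧ c ∈ pvKid L R u

-- reachability from the root
def pvReach (L R : List Int) (r x : Int) : Prop := Relation.ReflTransGen (pvStepRel L R) r x

-- the multiset of child slots of the nodes of P
def pvEdges (L R : List Int) (P : List Int) : List Int :=
  P.map (fun u => PySem.List.pyGetD L u (-2)) ++ P.map (fun u => PySem.List.pyGetD R u (-2))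

-- the processed nodes of a BFS state
def pvProc (stack seen : List Int) : List Int := seen.filter (fun u => decide (u ∉ stack))

-- the BFS loop invariant
structure PvInv (n : Int) (L R : List Int) (r : Int) (stack seen : List Int) : Prop where
  ndSeen : seen.Nodup
  ndStack : stack.Nodup
  sub : ∀ x ∈ stack, x ∈ seen
  rng : ∀ v ∈ seen, 0 ≤ v ∧ v < n
  rch : ∀ v ∈ seen, pvReach L R r v
  rt : r ∈ seen
  cls : ∀ v ∈ seen, v ∉ stack → ∀ c, pvStepRel L R v c → c ∈ seen
  prov : ∀ c ∈ seen, c ≠ r → 1 ≤ (pvEdges L R (pvProc stack seen)).count c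
  bnd : ∀ c, c ≠ -1 → (pvEdges L R (pvProc stack seen)).count c ≤ (if c ∈ seen ∧ c ≠ r then 1 else 0)

theorem pvEdges_count_le (n : Int) (L R : List Int) (hL : (L.length : Int) = n)
    (hR : (R.length : Int) = n) (P : List Int) (hnd : P.Nodup)
    (hrng : ∀ u ∈ P, 0 ≤ u ∧ u < n) (c : Int) :
    (pvEdges L R P).count c ≤ (L ++ R).count c := by
  have hsub : P ⊆ PySem.List.pyRange 0 n 1 := by
    intro u hu
    exact PySem.List.mem_pyRange_one.mpr ⟨(hrng u hu).1, (hrng u hu).2⟩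
  obtain ⟨l, hperm, hsl⟩ := hnd.subperm hsub
  have hspL : (P.map (fun u => PySem.List.pyGetD L u (-2))).Subperm
      ((PySem.List.pyRange 0 n 1).map (fun u => PySem.List.pyGetD L u (-2))) :=
    ⟨l.map _, hperm.map _, hsl.map _⟩
  have hspR : (P.map (fun u => PySem.List.pyGetD R u (-2))).Subperm
      ((PySem.List.pyRange 0 n 1).map (fun u => PySem.List.pyGetD R u (-2))) :=
    ⟨l.map _, hperm.map _, hsl.map _⟩
  have eL : (PySem.List.pyRange 0 n 1).map (fun u => PySem.List.pyGetD L u (-2)) = L := by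
    have := PySem.List.map_pyGetD_pyRange_zero' L (-2); rwa [hL] at this
  have eR : (PySem.List.pyRange 0 n 1).map (fun u => PySem.List.pyGetD R u (-2)) = R := by
    have := PySem.List.map_pyGetD_pyRange_zero' R (-2); rwa [hR] at this
  have h1 := hspL.count_le c
  have h2 := hspR.count_le c
  rw [eL] at h1; rw [eR] at h2
  simp only [pvEdges, List.count_append]
  omega

theorem pvEdges_count_eq_of_perm (n : Int) (L R : List Int) (hL : (L.length : Int) = n)
    (hR : (R.length : Int) = n) (P : List Int) (hperm : P.Perm (PySem.List.pyRange 0 n 1)) (c : Int) :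
    (pvEdges L R P).count c = (L ++ R).count c := by
  have eL : (PySem.List.pyRange 0 n 1).map (fun u => PySem.List.pyGetD L u (-2)) = L := by
    have := PySem.List.map_pyGetD_pyRange_zero' L (-2); rwa [hL] at this
  have eR : (PySem.List.pyRange 0 n 1).map (fun u => PySem.List.pyGetD R u (-2)) = R := by
    have := PySem.List.map_pyGetD_pyRange_zero' R (-2); rwa [hR] at this
  have h1 := (hperm.map (fun u => PySem.List.pyGetD L u (-2))).count_eq c
  have h2 := (hperm.map (fun u => PySem.List.pyGetD R u (-2))).count_eq c
  rw [eL] at h1; rw [eR] at h2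
  simp only [pvEdges, List.count_append]
  omega

theorem pvProc_pop_perm (v : Int) (rest seen : List Int) (hnd : seen.Nodup) (hv : v ∈ seen)
    (hvr : v ∉ rest) : (pvProc rest seen).Perm (v :: pvProc (v :: rest) seen) := by
  have nd1 : (pvProc rest seen).Nodup := hnd.filter _
  have nd2 : (v :: pvProc (v :: rest) seen).Nodup := by
    refine List.nodup_cons.mpr ⟨?_, hnd.filter _⟩
    intro hmem
    have := (List.mem_filter.mp hmem).2
    simp at this
  rw [List.perm_ext_iff_of_nodup nd1 nd2]
  intro x
  simp only [pvProc, List.mem_filter, List.mem_cons, decide_eq_true_eq]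
  constructor
  · rintro ⟨h1, h2⟩
    by_cases hxv : x = v
    · exact Or.inl hxv
    · exact Or.inr ⟨h1, by tauto⟩
  · rintro (rfl | ⟨h1, h2⟩)
    · exact ⟨hv, hvr⟩
    · exact ⟨h1, fun h => h2 (Or.inr h)⟩

theorem pvProc_pop_count (L R : List Int) (v : Int) (rest seen : List Int) (hnd : seen.Nodup)
    (hv : v ∈ seen) (hvr : v ∉ rest) (c : Int) :
    (pvEdges L R (pvProc rest seen)).count c
      = (pvEdges L R (pvProc (v :: rest) seen)).count c
        + (if PySem.List.pyGetD L v (-2) = c then 1 else 0)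
        + (if PySem.List.pyGetD R v (-2) = c then 1 else 0) := by
  have hperm := pvProc_pop_perm v rest seen hnd hv hvr
  have hL' := hperm.map (fun u => PySem.List.pyGetD L u (-2))
  have hR' := hperm.map (fun u => PySem.List.pyGetD R u (-2))
  have := (hL'.append hR').count_eq c
  simp only [pvEdges]
  rw [this]
  simp only [List.map_cons, List.count_append, List.count_cons]
  by_cases h1 : PySem.List.pyGetD L v (-2) = c <;> by_cases h2 : PySem.List.pyGetD R v (-2) = c <;>
    simp [h1, h2] <;> omega

theorem pvProc_pop_length (v : Int) (rest seen : List Int) (hnd : seen.Nodup) (hv : v ∈ seen)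
    (hvr : v ∉ rest) :
    (pvProc rest seen).length = (pvProc (v :: rest) seen).length + 1 := by
  have := (pvProc_pop_perm v rest seen hnd hv hvr).length_eq
  simpa using this

theorem pvProc_extend (rest seen cs : List Int) (hfresh : ∀ c ∈ cs, c ∉ seen) :
    pvProc (rest ++ cs) (seen ++ cs) = pvProc rest seen := by
  unfold pvProc
  rw [List.filter_append]
  have h2 : cs.filter (fun u => decide (u ∉ rest ++ cs)) = [] := by
    rw [List.filter_eq_nil_iff]
    intro c hc
    simp only [decide_eq_true_eq, List.mem_append, not_or]
    intro h; exact h.2 hc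
  have h1 : seen.filter (fun u => decide (u ∉ rest ++ cs))
      = seen.filter (fun u => decide (u ∉ rest)) := by
    apply List.filter_congr
    intro u hu
    have hnc : u ∉ cs := fun h => hfresh u h hu
    simp [List.mem_append, hnc]
  rw [h1, h2, List.append_nil]

theorem pvFind?_of_filter_singleton {p : Int → Bool} {l : List Int} {a : Int}
    (h : l.filter p = [a]) : l.find? p = some a := by
  induction l with
  | nil => simp at h
  | cons x xs ih =>
    by_cases hp : p x
    · rw [List.filter_cons_of_pos hp] at h
      obtain ⟨h1, _⟩ := List.cons_eq_cons.mp h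
      rw [List.find?_cons_of_pos hp, h1]
    · rw [List.filter_cons_of_neg hp] at h
      rw [List.find?_cons_of_neg hp]
      exact ih h

theorem pvReach_mem_of_closed (L R : List Int) (r : Int) (seen : List Int) (hr : r ∈ seen)
    (hcl : ∀ v ∈ seen, ∀ c, pvStepRel L R v c → c ∈ seen) :
    ∀ x, pvReach L R r x → x ∈ seen := by
  intro x h
  induction h with
  | refl => exact hr
  | tail _ hstep ih => exact hcl _ ih _ hstep

theorem pvProc_length_le (n : Int) (stack seen : List Int) (hnd : seen.Nodup)
    (hrng : ∀ v ∈ seen, 0 ≤ v ∧ v < n) : (pvProc stack seen).length ≤ n.toNat := by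
  have hnd2 : (pvProc stack seen).Nodup := hnd.filter _
  have hsub : pvProc stack seen ⊆ PySem.List.pyRange 0 n 1 := by
    intro u hu
    have hm : u ∈ seen := (List.mem_filter.mp hu).1
    exact PySem.List.mem_pyRange_one.mpr ⟨(hrng u hm).1, (hrng u hm).2⟩
  have := (hnd2.subperm hsub).length_le
  rw [PySem.List.length_pyRange_one] at this
  omega


theorem pvGetD_mem (n : Int) (X : List Int) (hX : (X.length : Int) = n) (v : Int)
    (h0 : 0 ≤ v) (h1 : v < n) : PySem.List.pyGetD X v (-2) ∈ X := by
  have hlt : v < (X.length : Int) := by omega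
  rw [PySem.List.pyGetD_eq_getElem X (-2) h0 hlt]
  exact List.getElem_mem _

theorem pvKid_sub (n : Int) (L R : List Int) (hL : (L.length : Int) = n)
    (hR : (R.length : Int) = n) (v : Int) (h0 : 0 ≤ v) (h1 : v < n) :
    ∀ c ∈ pvKid L R v, c ∈ L ++ R := by
  intro c hc
  simp only [pvKid, List.mem_cons, List.not_mem_nil, or_false] at hc
  rcases hc with rfl | rfl
  · exact List.mem_append_left _ (pvGetD_mem n L hL v h0 h1)
  · exact List.mem_append_right _ (pvGetD_mem n R hR v h0 h1)

-- the BFS loop invariant survives one pop that adds the fresh children cs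
theorem pvInv_step (n : Int) (L R : List Int) (r : Int)
    (hL : (L.length : Int) = n) (hR : (R.length : Int) = n)
    (hdom : ∀ c ∈ L ++ R, c = -1 ∨ (0 ≤ c ∧ c < n)) (hrL : r ∉ L) (hrR : r ∉ R)
    (v : Int) (rest seen cs : List Int) (inv : PvInv n L R r (v :: rest) seen)
    (hcs : ∀ c ∈ cs, c ∈ pvKid L R v ∧ c ≠ -1 ∧ c ∉ seen) (hndcs : cs.Nodup)
    (hslots : ∀ s ∈ pvKid L R v, s = -1 ∨ s ∈ cs)
    (hdistinct : ∀ c ∈ cs, PySem.List.pyGetD L v (-2) = c → PySem.List.pyGetD R v (-2) ≠ c) :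
    PvInv n L R r (rest ++ cs) (seen ++ cs) := by
  have hv : v ∈ seen := inv.sub v List.mem_cons_self
  have hvrng := inv.rng v hv
  have hvrest : v ∉ rest := (List.nodup_cons.mp inv.ndStack).1
  have hfresh : ∀ c ∈ cs, c ∉ seen := fun c hc => (hcs c hc).2.2
  have hcsrng : ∀ c ∈ cs, 0 ≤ c ∧ c < n := by
    intro c hc
    rcases hdom c (pvKid_sub n L R hL hR v hvrng.1 hvrng.2 c (hcs c hc).1) with h | h
    · exact absurd h (hcs c hc).2.1
    · exact h
  have hcsr : ∀ c ∈ cs, c ≠ r := by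
    intro c hc hcr
    rcases List.mem_append.mp (pvKid_sub n L R hL hR v hvrng.1 hvrng.2 c (hcs c hc).1) with h | h
    · exact hrL (hcr ▸ h)
    · exact hrR (hcr ▸ h)
  have hproc : pvProc (rest ++ cs) (seen ++ cs) = pvProc rest seen := pvProc_extend rest seen cs hfresh
  have hcnt := fun c => pvProc_pop_count L R v rest seen inv.ndSeen hv hvrest c
  -- a slot value that is neither -1 nor freshly added cannot occur
  have hslotL : ∀ c, c ≠ -1 → c ∉ cs → PySem.List.pyGetD L v (-2) ≠ c := by
    intro c h1 h2 he
    rcases hslots (PySem.List.pyGetD L v (-2)) (by simp [pvKid]) with h | h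
    · exact h1 (by rw [← he]; exact h)
    · exact h2 (he ▸ h)
  have hslotR : ∀ c, c ≠ -1 → c ∉ cs → PySem.List.pyGetD R v (-2) ≠ c := by
    intro c h1 h2 he
    rcases hslots (PySem.List.pyGetD R v (-2)) (by simp [pvKid]) with h | h
    · exact h1 (by rw [← he]; exact h)
    · exact h2 (he ▸ h)
  refine ⟨?_, ?_, ?_, ?_, ?_, ?_, ?_, ?_, ?_⟩
  · exact List.Nodup.append inv.ndSeen hndcs (fun a ha hb => hfresh a hb ha)
  · exact List.Nodup.append (List.nodup_cons.mp inv.ndStack).2 hndcs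
      (fun a ha hb => hfresh a hb (inv.sub a (List.mem_cons_of_mem _ ha)))
  · intro x hx
    rcases List.mem_append.mp hx with h | h
    · exact List.mem_append_left _ (inv.sub x (List.mem_cons_of_mem _ h))
    · exact List.mem_append_right _ h
  · intro x hx
    rcases List.mem_append.mp hx with h | h
    · exact inv.rng x h
    · exact hcsrng x h
  · intro x hx
    rcases List.mem_append.mp hx with h | h
    · exact inv.rch x h
    · exact Relation.ReflTransGen.tail (inv.rch v hv) ⟨(hcs x h).2.1, (hcs x h).1⟩
  · exact List.mem_append_left _ inv.rt
  · intro u hu hustack c hc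
    rcases List.mem_append.mp hu with h | h
    · by_cases huv : u = v
      · subst huv
        rcases hslots c hc.2 with h2 | h2
        · exact absurd h2 hc.1
        · exact List.mem_append_right _ h2
      · have hu2 : u ∉ v :: rest := by
          intro hm
          rcases List.mem_cons.mp hm with h3 | h3
          · exact huv h3
          · exact hustack (List.mem_append_left _ h3)
        exact List.mem_append_left _ (inv.cls u h hu2 c hc)
    · exact absurd (List.mem_append_right rest h) hustack
  · intro c hcmem hcr
    rw [hproc, hcnt c]
    rcases List.mem_append.mp hcmem with h | h
    · have := inv.prov c h hcr
      split_ifs <;> omega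
    · rcases List.mem_cons.mp (hcs c h).1 with hceq | hh
      · rw [if_pos hceq.symm]
        split_ifs <;> omega
      · simp only [List.mem_cons, List.not_mem_nil, or_false] at hh
        rw [if_pos hh.symm]
        split_ifs <;> omega
  · intro c h1
    rw [hproc, hcnt c]
    have hold := inv.bnd c h1
    by_cases hc2 : c ∈ cs
    · have hnotseen : c ∉ seen := hfresh c hc2
      rw [if_neg (fun h => hnotseen h.1)] at hold
      have hRHS : (if c ∈ seen ++ cs ∧ c ≠ r then 1 else 0)
          = (1 : Nat) := if_pos ⟨List.mem_append_right _ hc2, hcsr c hc2⟩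
      rw [hRHS]
      by_cases hA : PySem.List.pyGetD L v (-2) = c
      · rw [if_pos hA, if_neg (hdistinct c hc2 hA)]
        omega
      · rw [if_neg hA]
        split_ifs <;> omega
    · have hA : PySem.List.pyGetD L v (-2) ≠ c := hslotL c h1 hc2
      have hB : PySem.List.pyGetD R v (-2) ≠ c := hslotR c h1 hc2
      rw [if_neg hA, if_neg hB]
      have hiff : (c ∈ seen ++ cs ∧ c ≠ r) ↔ (c ∈ seen ∧ c ≠ r) := by
        constructor
        · rintro ⟨hm, hr2⟩
          rcases List.mem_append.mp hm with h | h
          · exact ⟨h, hr2⟩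
          · exact absurd h hc2
        · rintro ⟨hm, hr2⟩
          exact ⟨List.mem_append_left _ hm, hr2⟩
      by_cases hcc : c ∈ seen ∧ c ≠ r
      · rw [if_pos hcc] at hold
        rw [if_pos (hiff.mpr hcc)]
        omega
      · rw [if_neg hcc] at hold
        rw [if_neg (fun h => hcc (hiff.mp h))]
        omega

-- the BFS loop either ends with seen = the reachable set and at most one counted in-edge per node,
-- or returns False having found a node with two in-edges
theorem pvBfs_master (n : Int) (L R : List Int) (r : Int)
    (hL : (L.length : Int) = n) (hR : (R.length : Int) = n)
    (hdom : ∀ c ∈ L ++ R, c = -1 ∨ (0 ≤ c ∧ c < n)) (hrL : r ∉ L) (hrR : r ∉ R) :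
    ∀ (fuel : Nat) (stack seen : List Int), PvInv n L R r stack seen →
      n.toNat + 1 ≤ fuel + (pvProc stack seen).length →
      (∃ sF : List Int, pvBfsLoop n L R fuel stack seen = decide ((sF.length : Int) = n) ∧
          sF.Nodup ∧ (∀ v ∈ sF, 0 ≤ v ∧ v < n) ∧ (∀ x, x ∈ sF ↔ pvReach L R r x) ∧
          (∀ c, c ≠ -1 → (pvEdges L R sF).count c ≤ if c ∈ sF ∧ c ≠ r then 1 else 0)) ∨
      (pvBfsLoop n L R fuel stack seen = false ∧ ∃ c, 0 ≤ c ∧ c < n ∧ 2 ≤ (L ++ R).count c) := by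
  intro fuel
  induction fuel with
  | zero =>
    intro stack seen inv hfuel
    have := pvProc_length_le n stack seen inv.ndSeen inv.rng
    exact absurd hfuel (by omega)
  | succ fuel ih =>
    intro stack seen inv hfuel
    cases stack with
    | nil =>
      left
      refine ⟨seen, ?_, inv.ndSeen, inv.rng, ?_, ?_⟩
      · simp [pvBfsLoop, PySem.Set.len]
      · intro x
        exact ⟨fun hx => inv.rch x hx,
          fun hx => pvReach_mem_of_closed L R r seen inv.rt
            (fun u hu c hc => inv.cls u hu (List.not_mem_nil) c hc) x hx⟩
      · intro c h1
        have hb := inv.bnd c h1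
        have hp : pvProc [] seen = seen := by simp [pvProc]
        rwa [hp] at hb
    | cons v rest =>
      set a := PySem.List.pyGetD L v (-2) with ha
      set b := PySem.List.pyGetD R v (-2) with hb
      have hv : v ∈ seen := inv.sub v List.mem_cons_self
      have hvrng := inv.rng v hv
      have hvrest : v ∉ rest := (List.nodup_cons.mp inv.ndStack).1
      have haL : a ∈ L := pvGetD_mem n L hL v hvrng.1 hvrng.2
      have hbR : b ∈ R := pvGetD_mem n R hR v hvrng.1 hvrng.2
      have hadom := hdom a (List.mem_append_left R haL)
      have hbdom := hdom b (List.mem_append_right L hbR)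
      have har : a ≠ r := fun h => hrL (h ▸ haL)
      have hbr : b ≠ r := fun h => hrR (h ▸ hbR)
      have hlen := pvProc_pop_length v rest seen inv.ndSeen hv hvrest
      have hcnt := fun c => pvProc_pop_count L R v rest seen inv.ndSeen hv hvrest c
      have hPnd : (pvProc rest seen).Nodup := inv.ndSeen.filter _
      have hPrng : ∀ u ∈ pvProc rest seen, 0 ≤ u ∧ u < n :=
        fun u hu => inv.rng u (List.mem_filter.mp hu).1
      have hble := fun c => pvEdges_count_le n L R hL hR (pvProc rest seen) hPnd hPrng c
      have hkid : pvKid L R v = [a, b] := rfl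
      by_cases ha1 : a = -1
      · by_cases hb1 : b = -1
        · -- both children absent
          have hvis : pvVisit seen rest [a, b] = some (seen, rest) := by
            simp [pvVisit, ha1, hb1]
          have hred : pvBfsLoop n L R (fuel + 1) (v :: rest) seen
              = pvBfsLoop n L R fuel rest seen := by
            simp [pvBfsLoop, ← ha, ← hb, hvis]
          rw [hred]
          refine ih rest seen ?_ ?_
          · have hslots0 : ∀ s ∈ pvKid L R v, s = -1 ∨ s ∈ ([] : List Int) := by
              intro s hs
              rw [hkid] at hs
              rcases List.mem_cons.mp hs with rfl | hs
              · exact Or.inl ha1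
              · simp only [List.mem_cons, List.not_mem_nil, or_false] at hs
                subst hs
                exact Or.inl hb1
            have hstep := pvInv_step n L R r hL hR hdom hrL hrR v rest seen [] inv
              (by simp) (by simp) hslots0 (by simp)
            simpa using hstep
          · omega
        · by_cases hb2 : b ∈ seen
          · -- duplicate child: return False with a double in-edge witness
            right
            have hc : PySem.Set.contains seen b = true := (PySem.Set.contains_iff seen b).mpr hb2
            have hvis : pvVisit seen rest [a, b] = none := by
              simp [pvVisit, ha1, hb1, hb2]
            refine ⟨by simp [pvBfsLoop, ← ha, ← hb, hvis], b, ?_, ?_, ?_⟩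
            · rcases hbdom with h | h
              · exact absurd h hb1
              · exact h.1
            · rcases hbdom with h | h
              · exact absurd h hb1
              · exact h.2
            · have hprov := inv.prov b hb2 hbr
              have h2 := hcnt b
              have h3 := hble b
              split_ifs at h2 <;> omega
          · -- push the right child
            have hc : PySem.Set.contains seen b = false := by
              rw [Bool.eq_false_iff]
              intro hx
              exact hb2 ((PySem.Set.contains_iff seen b).mp hx)
            have hvis : pvVisit seen rest [a, b] = some (seen ++ [b], rest ++ [b]) := by
              simp [pvVisit, ha1, hb1, hb2]
            have hred : pvBfsLoop n L R (fuel + 1) (v :: rest) seen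
                = pvBfsLoop n L R fuel (rest ++ [b]) (seen ++ [b]) := by
              simp [pvBfsLoop, ← ha, ← hb, hvis]
            rw [hred]
            refine ih _ _ ?_ ?_
            · refine pvInv_step n L R r hL hR hdom hrL hrR v rest seen [b] inv ?_ (by simp) ?_ ?_
              · intro c hc2
                simp only [List.mem_cons, List.not_mem_nil, or_false] at hc2
                subst hc2
                exact ⟨by simp [hkid], hb1, hb2⟩
              · intro s hs
                rw [hkid] at hs
                rcases List.mem_cons.mp hs with rfl | hs
                · exact Or.inl ha1
                · simp only [List.mem_cons, List.not_mem_nil, or_false] at hs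
                  subst hs
                  exact Or.inr (by simp)
              · intro c hc2 hA
                simp only [List.mem_cons, List.not_mem_nil, or_false] at hc2
                subst hc2
                intro _
                exact hb1 (hA.symm.trans ha1)
            · have he := congrArg List.length
                (pvProc_extend rest seen [b] (by intro c hcx; simp at hcx; subst hcx; exact hb2))
              omega
      · by_cases ha2 : a ∈ seen
        · -- duplicate left child: return False
          right
          have hc : PySem.Set.contains seen a = true := (PySem.Set.contains_iff seen a).mpr ha2
          have hvis : pvVisit seen rest [a, b] = none := by
            simp [pvVisit, ha1, ha2]
          refine ⟨by simp [pvBfsLoop, ← ha, ← hb, hvis], a, ?_, ?_, ?_⟩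
          · rcases hadom with h | h
            · exact absurd h ha1
            · exact h.1
          · rcases hadom with h | h
            · exact absurd h ha1
            · exact h.2
          · have hprov := inv.prov a ha2 har
            have h2 := hcnt a
            have h3 := hble a
            split_ifs at h2 <;> omega
        · -- push the left child; then look at the right one
          have hca : PySem.Set.contains seen a = false := by
            rw [Bool.eq_false_iff]
            intro hx
            exact ha2 ((PySem.Set.contains_iff seen a).mp hx)
          have hadd : PySem.Set.add seen a = seen ++ [a] := PySem.Set.add_of_not_mem ha2
          by_cases hb1 : b = -1
          · have hvis : pvVisit seen rest [a, b] = some (seen ++ [a], rest ++ [a]) := by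
              simp [pvVisit, ha1, hadd, hb1]
              exact ha2
            have hred : pvBfsLoop n L R (fuel + 1) (v :: rest) seen
                = pvBfsLoop n L R fuel (rest ++ [a]) (seen ++ [a]) := by
              simp [pvBfsLoop, ← ha, ← hb, hvis]
            rw [hred]
            refine ih _ _ ?_ ?_
            · refine pvInv_step n L R r hL hR hdom hrL hrR v rest seen [a] inv ?_ (by simp) ?_ ?_
              · intro c hc2
                simp only [List.mem_cons, List.not_mem_nil, or_false] at hc2
                subst hc2
                exact ⟨by simp [hkid], ha1, ha2⟩
              · intro s hs
                rw [hkid] at hs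
                rcases List.mem_cons.mp hs with rfl | hs
                · exact Or.inr (by simp)
                · simp only [List.mem_cons, List.not_mem_nil, or_false] at hs
                  subst hs
                  exact Or.inl hb1
              · intro c hc2 hA
                simp only [List.mem_cons, List.not_mem_nil, or_false] at hc2
                subst hc2
                exact fun hx => ha1 (hx.symm.trans hb1)
            · have he := congrArg List.length
                (pvProc_extend rest seen [a] (by intro c hcx; simp at hcx; subst hcx; exact ha2))
              omega
          · by_cases hb3 : b ∈ seen ++ [a]
            · -- duplicate right child after adding the left one: return False
              right
              have hcb : PySem.Set.contains (seen ++ [a]) b = true :=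
                (PySem.Set.contains_iff (seen ++ [a]) b).mpr hb3
              have hvis : pvVisit seen rest [a, b] = none := by
                simp only [pvVisit, if_neg ha1, if_neg hb1]
                simp [ha2]
                intro hbs
                rcases List.mem_append.mp hb3 with h | h
                · exact absurd h hbs
                · simpa using h
              refine ⟨by simp [pvBfsLoop, ← ha, ← hb, hvis], b, ?_, ?_, ?_⟩
              · rcases hbdom with h | h
                · exact absurd h hb1
                · exact h.1
              · rcases hbdom with h | h
                · exact absurd h hb1
                · exact h.2
              · have h2 := hcnt b
                have h3 := hble b
                rcases List.mem_append.mp hb3 with hbs | hba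
                · have hprov := inv.prov b hbs hbr
                  split_ifs at h2 <;> omega
                · simp only [List.mem_cons, List.not_mem_nil, or_false] at hba
                  rw [if_pos hba.symm] at h2
                  have h4 : (if b = b then (1 : Nat) else 0) = 1 := if_pos rfl
                  rw [h4] at h2
                  omega
            · -- push both children
              have hab : b ≠ a := fun h => hb3 (List.mem_append_right seen (by simp [h]))
              have hbseen : b ∉ seen := fun h => hb3 (List.mem_append_left _ h)
              have hcb : PySem.Set.contains (seen ++ [a]) b = false := by
                rw [Bool.eq_false_iff]
                intro hx
                exact hb3 ((PySem.Set.contains_iff (seen ++ [a]) b).mp hx)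
              have hbadd : PySem.Set.add (seen ++ [a]) b = seen ++ [a] ++ [b] :=
                PySem.Set.add_of_not_mem hb3
              have hvis : pvVisit seen rest [a, b]
                  = some (seen ++ [a] ++ [b], rest ++ [a] ++ [b]) := by
                simp only [pvVisit, if_neg ha1, if_neg hb1]
                simp [ha2, hbseen, hab]
              have hred : pvBfsLoop n L R (fuel + 1) (v :: rest) seen
                  = pvBfsLoop n L R fuel (rest ++ [a] ++ [b]) (seen ++ [a] ++ [b]) := by
                simp [pvBfsLoop, ← ha, ← hb, hvis]
              rw [hred]
              rw [List.append_assoc rest [a] [b], List.append_assoc seen [a] [b]]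
              refine ih _ _ ?_ ?_
              · refine pvInv_step n L R r hL hR hdom hrL hrR v rest seen [a, b] inv ?_
                  (List.nodup_cons.mpr ⟨by
                    simp only [List.mem_cons, List.not_mem_nil, or_false]
                    exact fun h => hab h.symm, by simp⟩) ?_ ?_
                · intro c hc2
                  rcases List.mem_cons.mp hc2 with rfl | hc2
                  · exact ⟨by simp [hkid], ha1, ha2⟩
                  · simp only [List.mem_cons, List.not_mem_nil, or_false] at hc2
                    subst hc2
                    exact ⟨by simp [hkid], hb1, hbseen⟩
                · intro s hs
                  rw [hkid] at hs
                  rcases List.mem_cons.mp hs with rfl | hs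
                  · exact Or.inr (by simp)
                  · simp only [List.mem_cons, List.not_mem_nil, or_false] at hs
                    subst hs
                    exact Or.inr (by simp)
                · intro c hc2 hA
                  rcases List.mem_cons.mp hc2 with rfl | hc2
                  · intro hB
                    exact hab hB
                  · simp only [List.mem_cons, List.not_mem_nil, or_false] at hc2
                    subst hc2
                    exact absurd hA (fun h => hab h.symm)
              · have hfr : ∀ c ∈ [a, b], c ∉ seen := by
                  intro c hcx
                  rcases List.mem_cons.mp hcx with rfl | hcx
                  · exact ha2
                  · simp only [List.mem_cons, List.not_mem_nil, or_false] at hcx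
                    subst hcx
                    exact hbseen
                have he := congrArg List.length (pvProc_extend rest seen [a, b] hfr)
                simp only [List.singleton_append] at he ⊢
                omega

theorem pvNewFrom_spec (L R : List Int) (visited : PySem.Set Int) :
    (pvNewFrom L R visited).Nodup ∧
    (∀ x, x ∈ pvNewFrom L R visited ↔
        x ∉ visited ∧ ∃ v ∈ visited, pvStepRel L R v x) := by
  have aux : ∀ (l : List Int) (acc : PySem.Set Int), acc.Nodup →
      (l.foldl (fun new v =>
          [PySem.List.pyGetD L v (-2), PySem.List.pyGetD R v (-2)].foldl
            (fun new c => if c ≠ -1 ∧ c ∉ visited then PySem.Set.add new c else new) new)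
        acc).Nodup ∧
      ∀ x, x ∈ l.foldl (fun new v =>
          [PySem.List.pyGetD L v (-2), PySem.List.pyGetD R v (-2)].foldl
            (fun new c => if c ≠ -1 ∧ c ∉ visited then PySem.Set.add new c else new) new)
        acc ↔ x ∈ acc ∨ ∃ v ∈ l, pvStepRel L R v x ∧ x ∉ visited := by
    intro l
    induction l with
    | nil => intro acc h; simpa using h
    | cons v t ih =>
      intro acc hacc
      have inner : ∀ (c : Int) (s : PySem.Set Int), s.Nodup →
          ((if c ≠ -1 ∧ c ∉ visited then PySem.Set.add s c else s).Nodup ∧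
            ∀ x, x ∈ (if c ≠ -1 ∧ c ∉ visited then PySem.Set.add s c else s) ↔
              x ∈ s ∨ (x = c ∧ c ≠ -1 ∧ c ∉ visited)) := by
        intro c s hs
        by_cases hc : c ≠ -1 ∧ c ∉ visited
        · rw [if_pos hc]
          refine ⟨PySem.Set.nodup_add s c hs, fun x => ?_⟩
          rw [PySem.Set.mem_add]
          tauto
        · rw [if_neg hc]
          exact ⟨hs, fun x => by tauto⟩
      obtain ⟨nd1, mem1⟩ := inner (PySem.List.pyGetD L v (-2)) acc hacc
      obtain ⟨nd2, mem2⟩ := inner (PySem.List.pyGetD R v (-2)) _ nd1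
      obtain ⟨nd3, mem3⟩ := ih _ nd2
      refine ⟨by simpa using nd3, fun x => ?_⟩
      simp only [List.foldl_cons, List.foldl_nil] at mem3 ⊢
      rw [mem3 x, mem2 x, mem1 x]
      constructor
      · rintro (((h | h) | h) | ⟨u, hu, hs, hnv⟩)
        · exact Or.inl h
        · exact Or.inr ⟨v, List.mem_cons_self, ⟨by rw [h.1]; exact h.2.1,
            by rw [h.1]; simp [pvKid]⟩, by rw [h.1]; exact h.2.2⟩
        · exact Or.inr ⟨v, List.mem_cons_self, ⟨by rw [h.1]; exact h.2.1,
            by rw [h.1]; simp [pvKid]⟩, by rw [h.1]; exact h.2.2⟩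
        · exact Or.inr ⟨u, List.mem_cons_of_mem _ hu, hs, hnv⟩
      · rintro (h | ⟨u, hu, ⟨hx1, hx2⟩, hx3⟩)
        · exact Or.inl (Or.inl (Or.inl h))
        · rcases List.mem_cons.mp hu with rfl | hu
          · simp only [pvKid, List.mem_cons, List.not_mem_nil, or_false] at hx2
            rcases hx2 with rfl | rfl
            · exact Or.inl (Or.inl (Or.inr ⟨rfl, hx1, hx3⟩))
            · exact Or.inl (Or.inr ⟨rfl, hx1, hx3⟩)
          · exact Or.inr ⟨u, hu, ⟨hx1, hx2⟩, hx3⟩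
  obtain ⟨nd, mem⟩ := aux visited PySem.Set.empty (by simp [PySem.Set.empty])
  refine ⟨nd, fun x => ?_⟩
  rw [pvNewFrom, mem x]
  simp only [PySem.Set.empty, List.not_mem_nil, false_or]
  tauto

theorem pvSat_main (n : Int) (L R : List Int) (r : Int)
    (hL : (L.length : Int) = n) (hR : (R.length : Int) = n)
    (hdom : ∀ c ∈ L ++ R, c = -1 ∨ (0 ≤ c ∧ c < n)) :
    ∀ (ks : List Int) (visited : List Int), visited.Nodup → r ∈ visited →
      (∀ v ∈ visited, 0 ≤ v ∧ v < n) → (∀ v ∈ visited, pvReach L R r v) →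
      n.toNat + 1 ≤ ks.length + visited.length →
      (pvSatLoop L R ks visited).Nodup ∧
        (∀ x, x ∈ pvSatLoop L R ks visited ↔ pvReach L R r x) := by
  intro ks
  induction ks with
  | nil =>
    intro visited hnd hr hrng hrch hfuel
    exfalso
    have hsub : visited ⊆ PySem.List.pyRange 0 n 1 := by
      intro u hu
      exact PySem.List.mem_pyRange_one.mpr ⟨(hrng u hu).1, (hrng u hu).2⟩
    have := (hnd.subperm hsub).length_le
    rw [PySem.List.length_pyRange_one] at this
    simp at hfuel
    omega
  | cons k ks ih =>
    intro visited hnd hr hrng hrch hfuel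
    obtain ⟨ndN, memN⟩ := pvNewFrom_spec L R visited
    by_cases hE : (pvNewFrom L R visited).isEmpty
    · simp only [pvSatLoop, hE, if_true]
      have hcl : ∀ v ∈ visited, ∀ c, pvStepRel L R v c → c ∈ visited := by
        intro v hvv c hc
        by_contra hcn
        have : c ∈ pvNewFrom L R visited := (memN c).mpr ⟨hcn, v, hvv, hc⟩
        rw [List.isEmpty_iff.mp hE] at this
        simp at this
      exact ⟨hnd, fun x => ⟨hrch x, pvReach_mem_of_closed L R r visited hr hcl x⟩⟩
    · simp only [pvSatLoop, hE]
      have hdisj : ∀ x ∈ pvNewFrom L R visited, x ∉ visited :=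
        fun x hx => ((memN x).mp hx).1
      have hunion : PySem.Set.union visited (pvNewFrom L R visited)
          = visited ++ pvNewFrom L R visited :=
        PySem.Set.update_eq_append_of_disjoint visited _ ndN hdisj
      have hne : pvNewFrom L R visited ≠ [] := fun h => hE (by simp [h])
      have hlen1 : 1 ≤ (pvNewFrom L R visited).length := by
        cases h : pvNewFrom L R visited with
        | nil => exact absurd h hne
        | cons a t => simp
      have hstep_mem : ∀ x ∈ pvNewFrom L R visited, pvStepRel L R x x ∨ True := fun _ _ => Or.inr trivial
      have hrngN : ∀ x ∈ pvNewFrom L R visited, 0 ≤ x ∧ x < n := by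
        intro x hx
        obtain ⟨-, v, hvv, hs⟩ := (memN x).mp hx
        rcases hdom x (pvKid_sub n L R hL hR v (hrng v hvv).1 (hrng v hvv).2 x hs.2) with h | h
        · exact absurd h hs.1
        · exact h
      have hrchN : ∀ x ∈ pvNewFrom L R visited, pvReach L R r x := by
        intro x hx
        obtain ⟨-, v, hvv, hs⟩ := (memN x).mp hx
        exact Relation.ReflTransGen.tail (hrch v hvv) hs
      rw [hunion]
      apply ih
      · exact List.Nodup.append hnd ndN (fun a ha hb => hdisj a hb ha)
      · exact List.mem_append_left _ hr
      · intro x hx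
        rcases List.mem_append.mp hx with h | h
        · exact hrng x h
        · exact hrngN x h
      · intro x hx
        rcases List.mem_append.mp hx with h | h
        · exact hrch x h
        · exact hrchN x h
      · rw [List.length_append]
        simp only [List.length_cons] at hfuel
        omega


theorem pvRootCount_eq (n : Int) (L R : List Int) :
    ((PySem.List.pyRange 0 n 1).filter (fun v => decide (v ∉ L ∧ v ∉ R))).length
      = n.toNat
        - (PySem.Set.ofList ((L ++ R).filter (fun c => decide (0 ≤ c ∧ c < n)))).length := by
  have hperm := List.filter_append_perm (fun v => decide (v ∉ L ∧ v ∉ R))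
    (PySem.List.pyRange 0 n 1)
  have hlen := hperm.length_eq
  rw [List.length_append, PySem.List.length_pyRange_one] at hlen
  have hperm2 : ((PySem.List.pyRange 0 n 1).filter
        (fun v => !decide (v ∉ L ∧ v ∉ R))).Perm
      (PySem.Set.ofList ((L ++ R).filter (fun c => decide (0 ≤ c ∧ c < n)))) := by
    rw [List.perm_ext_iff_of_nodup ((PySem.List.nodup_pyRange_one 0 n).filter _)
      (PySem.Set.nodup_ofList _)]
    intro x
    rw [List.mem_filter, PySem.Set.mem_ofList, List.mem_filter, PySem.List.mem_pyRange_one]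
    constructor
    · rintro ⟨⟨h0, h1⟩, h2⟩
      simp only [Bool.not_eq_true', decide_eq_false_iff_not, not_and_or, not_not] at h2
      rcases h2 with hm | hm
      · exact ⟨List.mem_append_left _ hm, by simp [h0, h1]⟩
      · exact ⟨List.mem_append_right _ hm, by simp [h0, h1]⟩
    · rintro ⟨hm, hrng⟩
      simp only [decide_eq_true_eq] at hrng
      refine ⟨hrng, ?_⟩
      simp only [Bool.not_eq_true', decide_eq_false_iff_not, not_and_or, not_not]
      exact (List.mem_append.mp hm).imp id id
  have hlen2 := hperm2.length_eq
  omega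

theorem pvMissingFilter_eq (n : Int) (L R : List Int) :
    (PySem.List.pyRange 0 n 1).filter
        (fun v => !(PySem.Set.contains (PySem.Set.union (PySem.Set.ofList L) (PySem.Set.ofList R)) v))
      = (PySem.List.pyRange 0 n 1).filter (fun v => decide (v ∉ L ∧ v ∉ R)) := by
  apply List.filter_congr
  intro v _
  by_cases h : v ∈ L ∨ v ∈ R
  · have hc : PySem.Set.contains (PySem.Set.union (PySem.Set.ofList L) (PySem.Set.ofList R)) v
        = true := by
      rw [PySem.Set.contains_iff, PySem.Set.mem_union]
      rcases h with h | h
      · exact Or.inl ((PySem.Set.mem_ofList L v).mpr h)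
      · exact Or.inr ((PySem.Set.mem_ofList R v).mpr h)
    rw [hc]
    rcases h with h | h <;> simp [h]
  · push_neg at h
    have hc : PySem.Set.contains (PySem.Set.union (PySem.Set.ofList L) (PySem.Set.ofList R)) v
        = false := by
      rw [Bool.eq_false_iff, Ne, PySem.Set.contains_iff, PySem.Set.mem_union]
      rintro (hx | hx)
      · exact h.1 ((PySem.Set.mem_ofList L v).mp hx)
      · exact h.2 ((PySem.Set.mem_ofList R v).mp hx)
    rw [hc]
    simp [h.1, h.2]

theorem pvMissing_eq (n : Int) (L R : List Int) :
    PySem.Set.diff (PySem.Set.ofList (PySem.List.pyRange 0 n 1))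
        (PySem.Set.union (PySem.Set.ofList L) (PySem.Set.ofList R))
      = (PySem.List.pyRange 0 n 1).filter (fun v => decide (v ∉ L ∧ v ∉ R)) := by
  rw [PySem.Set.ofList_eq_self_of_nodup _ (PySem.List.nodup_pyRange_one 0 n)]
  exact pvMissingFilter_eq n L R

theorem pvCountFilter (L R : List Int) (v : Int) (hv : 0 ≤ v) :
    List.count v ((L ++ R).filter (fun c => c != -1)) = List.count v (L ++ R) := by
  apply List.count_filter
  simp only [bne_iff_ne, ne_eq, decide_eq_true_eq]
  omega

theorem pvRootsB_eq (n : Int) (L R : List Int) :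
    (PySem.List.pyRange 0 n 1).filter
        (fun v => (PySem.Dict.counter ((L ++ R).filter (fun c => c != -1))).getD v 0 == 0)
      = (PySem.List.pyRange 0 n 1).filter (fun v => decide (v ∉ L ∧ v ∉ R)) := by
  apply List.filter_congr
  intro v hv
  have hv0 : 0 ≤ v := (PySem.List.mem_pyRange_one.mp hv).1
  rw [PySem.Dict.getD_counter, pvCountFilter L R v hv0]
  rw [Bool.eq_iff_iff]
  simp only [beq_iff_eq, Int.natCast_eq_zero, decide_eq_true_eq, List.count_eq_zero,
    List.mem_append]
  tauto

theorem validateBinaryTreeNodesBFS_main (n : Int) (L R : List Int)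
    (hpre : Pre_validateBinaryTreeNodesBFS n L R) :
    validateBinaryTreeNodesBFS n L R = validateBinaryTreeNodesBFS_alt n L R := by
  have hcountP := pvRootCount_eq n L R
  by_cases hF1 : ((PySem.List.pyRange 0 n 1).filter (fun v => decide (v ∉ L ∧ v ∉ R))).length = 1
  · -- exactly one root r; Pre_ gives the well-formed shape
    obtain ⟨r, hFr⟩ := List.length_eq_one_iff.mp hF1
    have hrF : r ∈ (PySem.List.pyRange 0 n 1).filter (fun v => decide (v ∉ L ∧ v ∉ R)) := by
      rw [hFr]; simp
    have hrmem := (List.mem_filter.mp hrF).1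
    have hrpred := (List.mem_filter.mp hrF).2
    have hr0 : 0 ≤ r := (PySem.List.mem_pyRange_one.mp hrmem).1
    have hrn : r < n := (PySem.List.mem_pyRange_one.mp hrmem).2
    have hrLR : r ∉ L ∧ r ∉ R := by simpa using hrpred
    rcases hpre with h | hclean
    · rw [← hcountP] at h; exact absurd hF1 h
    obtain ⟨hL, hR, hdom⟩ := hclean
    have hroot : pvFindRoot n L R = r := by
      unfold pvFindRoot
      simp only [pvMissing_eq n L R, hFr]
      rw [if_neg (by simp [PySem.Set.len])]
      rw [pvFind?_of_filter_singleton ((pvMissingFilter_eq n L R).trans hFr)]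
    have hof : PySem.Set.ofList [r] = [r] :=
      PySem.Set.ofList_eq_self_of_nodup _ (List.nodup_singleton r)
    have hA : validateBinaryTreeNodesBFS n L R
        = pvBfsLoop n L R (n.toNat + 1) [r] [r] := by
      unfold validateBinaryTreeNodesBFS
      rw [hroot, if_neg (by omega), hof]
    have hinv : PvInv n L R r [r] [r] := by
      refine ⟨List.nodup_singleton r, List.nodup_singleton r, fun x hx => hx, ?_, ?_,
        List.mem_singleton.mpr rfl, ?_, ?_, ?_⟩
      · intro v hv
        rw [List.mem_singleton] at hv
        subst hv
        exact ⟨hr0, hrn⟩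
      · intro v hv
        rw [List.mem_singleton] at hv
        subst hv
        exact Relation.ReflTransGen.refl
      · intro v hv hvs
        exact absurd hv hvs
      · intro c hc hcr
        rw [List.mem_singleton] at hc
        exact absurd hc hcr
      · intro c _
        have hp : pvProc [r] [r] = [] := by simp [pvProc]
        rw [hp]
        simp only [pvEdges, List.map_nil, List.append_nil, List.count_nil]
        split_ifs <;> omega
    have hmaster := pvBfs_master n L R r hL hR hdom hrLR.1 hrLR.2 (n.toNat + 1) [r] [r] hinv
      (by omega)
    have hsat := pvSat_main n L R r hL hR hdom (PySem.List.pyRange 0 n 1) [r]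
      (List.nodup_singleton r) (List.mem_singleton.mpr rfl)
      (by
        intro v hv
        rw [List.mem_singleton] at hv
        subst hv
        exact ⟨hr0, hrn⟩)
      (by
        intro v hv
        rw [List.mem_singleton] at hv
        subst hv
        exact Relation.ReflTransGen.refl)
      (by rw [PySem.List.length_pyRange_one]; simp)
    by_cases hdeg : ∃ c, 0 ≤ c ∧ c < n ∧ 2 ≤ List.count c (L ++ R)
    · -- a node with two parents: both sides return False
      have hany : (PySem.List.pyRange 0 n 1).any
          (fun v => 1 < (PySem.Dict.counter ((L ++ R).filter (fun c => c != -1))).getD v 0)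
          = true := by
        obtain ⟨c, h0, h1, h2⟩ := hdeg
        rw [List.any_eq_true]
        refine ⟨c, PySem.List.mem_pyRange_one.mpr ⟨h0, h1⟩, ?_⟩
        rw [PySem.Dict.getD_counter, pvCountFilter L R c h0]
        simp only [decide_eq_true_eq]
        omega
      have hB : validateBinaryTreeNodesBFS_alt n L R = false := by
        unfold validateBinaryTreeNodesBFS_alt
        simp only [pvRootsB_eq n L R, hFr, hany]
        simp
      rw [hA, hB]
      rcases hmaster with ⟨sF, hres, hnd, hrng2, hmem, hbnd⟩ | ⟨hres, _⟩
      · rw [hres]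
        obtain ⟨c, h0, h1, h2⟩ := hdeg
        rw [decide_eq_false_iff_not]
        intro heq
        have hsub : sF ⊆ PySem.List.pyRange 0 n 1 := by
          intro u hu
          exact PySem.List.mem_pyRange_one.mpr ⟨(hrng2 u hu).1, (hrng2 u hu).2⟩
        have hlen3 : (PySem.List.pyRange 0 n 1).length ≤ sF.length := by
          rw [PySem.List.length_pyRange_one]
          omega
        have hperm := (hnd.subperm hsub).perm_of_length_le hlen3
        have hedge := pvEdges_count_eq_of_perm n L R hL hR sF hperm c
        have hcin : c ∈ sF := hperm.mem_iff.mpr (PySem.List.mem_pyRange_one.mpr ⟨h0, h1⟩)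
        have hcr : c ≠ r := by
          intro hceq
          subst hceq
          have : c ∉ L ++ R := by
            rw [List.mem_append]
            rintro (hx | hx)
            · exact hrLR.1 hx
            · exact hrLR.2 hx
          have hz := List.count_eq_zero.mpr this
          omega
        have hb := hbnd c (by omega)
        rw [if_pos ⟨hcin, hcr⟩] at hb
        omega
      · exact hres
    · -- no node with two parents: both sides count the reachable set
      have hany : (PySem.List.pyRange 0 n 1).any
          (fun v => 1 < (PySem.Dict.counter ((L ++ R).filter (fun c => c != -1))).getD v 0)
          = false := by
        rw [← Bool.not_eq_true, List.any_eq_true]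
        rintro ⟨v, hvmem, hvlt⟩
        have hv0 : 0 ≤ v := (PySem.List.mem_pyRange_one.mp hvmem).1
        rw [PySem.Dict.getD_counter, pvCountFilter L R v hv0] at hvlt
        simp only [decide_eq_true_eq] at hvlt
        exact hdeg ⟨v, hv0, (PySem.List.mem_pyRange_one.mp hvmem).2, by omega⟩
      have hB : validateBinaryTreeNodesBFS_alt n L R
          = decide (((pvSatLoop L R (PySem.List.pyRange 0 n 1) [r]).length : Int) = n) := by
        unfold validateBinaryTreeNodesBFS_alt
        simp only [pvRootsB_eq n L R, hFr, hany]
        simp [hof]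
      rcases hmaster with ⟨sF, hres, hnd, _, hmem, _⟩ | ⟨_, c, h0, h1, h2⟩
      · obtain ⟨ndV, memV⟩ := hsat
        have hperm : sF.Perm (pvSatLoop L R (PySem.List.pyRange 0 n 1) [r]) :=
          (List.perm_ext_iff_of_nodup hnd ndV).mpr (fun x => (hmem x).trans ((memV x).symm))
        rw [hA, hB, hres, hperm.length_eq]
      · exact absurd ⟨c, h0, h1, h2⟩ hdeg
  · -- not exactly one root: both sides return False
    have hroot : pvFindRoot n L R = -1 := by
      unfold pvFindRoot
      simp only [pvMissing_eq n L R]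
      rcases Nat.lt_or_ge 1
          ((PySem.List.pyRange 0 n 1).filter (fun v => decide (v ∉ L ∧ v ∉ R))).length with h | h
      · rw [if_pos (by simp only [PySem.Set.len]; omega)]
      · have h0 : ((PySem.List.pyRange 0 n 1).filter
            (fun v => decide (v ∉ L ∧ v ∉ R))).length = 0 := by omega
        rw [if_neg (by simp only [PySem.Set.len]; omega)]
        have hnone : (PySem.List.pyRange 0 n 1).find?
            (fun v => !(PySem.Set.contains
              (PySem.Set.union (PySem.Set.ofList L) (PySem.Set.ofList R)) v)) = none := by
          rw [List.find?_eq_none]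
          intro x hx hpx
          have : x ∈ (PySem.List.pyRange 0 n 1).filter
              (fun v => !(PySem.Set.contains
                (PySem.Set.union (PySem.Set.ofList L) (PySem.Set.ofList R)) v)) :=
            List.mem_filter.mpr ⟨hx, hpx⟩
          rw [pvMissingFilter_eq n L R] at this
          rw [List.length_eq_zero_iff.mp h0] at this
          simp at this
        rw [hnone]
    have hA : validateBinaryTreeNodesBFS n L R = false := by
      unfold validateBinaryTreeNodesBFS
      rw [hroot]
      simp
    have hB : validateBinaryTreeNodesBFS_alt n L R = false := by
      unfold validateBinaryTreeNodesBFS_alt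
      simp only [pvRootsB_eq n L R]
      rw [if_pos hF1]
    rw [hA, hB]

-- ===== VERDICT (by name: the statement is the Claim_ definition above) =====
theorem validateBinaryTreeNodesBFS_spec : Claim_equal_validateBinaryTreeNodesBFS := by
  intro n L R _ hpre
  exact validateBinaryTreeNodesBFS_main n L R hpre
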